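-- pv_equiv track=rewrite | github.com/0SRAF0/TravelPlanner | backend/app/agents/destination_research_agent.py | _median_budget
-- ===== SOURCE A (Python) =====
-- def _median_budget(bands: list[str]) -> int:
--     vals: list[int] = []
--     for b in bands:
--         try:
--             x = int(b)
--         except Exception:
--             continue
--         if x < 1:
--             x = 1
--         if x > 5:
--             x = 5
--         vals.append(x)
--     if not vals:
--         return 3
--     vals.sort()
--     m = vals[len(vals) // 2]
--     return m
-- ===== SOURCE B (Python) =====
-- def _median_budget(bands: list[str]) -> int:
--     # Counting version: tally the five clamped bands in one pass, then walk
--     # cumulative counts to the element of rank len//2 (same value as A's sort+index).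
--     counts = [0, 0, 0, 0, 0]
--     n = 0
--     for b in bands:
--         try:
--             x = int(b)
--         except Exception:
--             continue
--         if x < 1:
--             x = 1
--         if x > 5:
--             x = 5
--         counts[x - 1] = counts[x - 1] + 1
--         n = n + 1
--     if n == 0:
--         return 3
--     k = n // 2
--     for v in range(1, 5):
--         c = counts[v - 1]
--         if k < c:
--             return v
--         k = k - c
--     return 5
-- ===== Notes on version B (the rewrite author's own statement) =====
-- stated objective: alternative
-- what changed: Replaces sort-then-index median selection by a single-pass counting of the five clamped band values followed by a cumulative-count walk to the element of rank len//2.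
import Mathlib
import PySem

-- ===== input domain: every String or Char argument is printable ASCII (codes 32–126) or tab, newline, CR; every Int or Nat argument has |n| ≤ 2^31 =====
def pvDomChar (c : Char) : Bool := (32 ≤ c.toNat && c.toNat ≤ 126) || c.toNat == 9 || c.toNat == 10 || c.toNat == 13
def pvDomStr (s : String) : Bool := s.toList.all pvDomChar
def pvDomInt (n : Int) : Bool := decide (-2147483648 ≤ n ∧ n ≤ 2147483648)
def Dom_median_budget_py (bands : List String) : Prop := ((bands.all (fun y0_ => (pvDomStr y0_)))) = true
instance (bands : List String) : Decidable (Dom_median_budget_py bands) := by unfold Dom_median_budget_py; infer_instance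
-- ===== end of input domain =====

-- B replaces A's sort-then-index median by a one-pass tally of the five clamped
-- bands plus a cumulative-count walk to rank len//2 (objective: alternative algorithm; int-parsing dominates both, so no measured speedup).

-- ===== PORT A =====
-- literal port of A: collect int(b) clamped to [1,5], sort, take element len//2 (default 3)
def median_budget_py (bands : List String) : Int :=
  let vals := bands.foldl (fun (vals : List Int) b =>
    match PySem.Int.ofStr? b with
    | none => vals
    | some x => vals ++ [if x < 1 then 1 else if x > 5 then 5 else x]) []
  if vals = [] then 3
  else
    -- vals[len(vals) // 2]: the index is always in range for a nonempty list
    PySem.List.pyGetD (PySem.List.sorted vals (fun x => x) false)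
      (PySem.Int.floordiv (PySem.List.len vals) 2) 0

-- ===== PORT B =====
-- helper for B's early-return 'for v in range(1, 5)' selection loop
def selLoop (counts : List Int) : List Int → Int → Int
  | [], _ => 5
  | v :: vs, k =>
    let c := PySem.List.pyGetD counts (v - 1) 0
    if k < c then v else selLoop counts vs (k - c)

-- literal port of B: one-pass tally counts[x-1], then cumulative walk to rank n//2
def median_budget_py_alt (bands : List String) : Int :=
  let st := bands.foldl (fun (st : List Int × Int) b =>
    match PySem.Int.ofStr? b with
    | none => st
    | some x =>
      let x := if x < 1 then 1 else if x > 5 then 5 else x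
      (PySem.List.pySetD st.1 (x - 1) (PySem.List.pyGetD st.1 (x - 1) 0 + 1), st.2 + 1))
    ([0, 0, 0, 0, 0], 0)
  if st.2 = 0 then 3
  else selLoop st.1 (PySem.List.pyRange 1 5 1) (PySem.Int.floordiv st.2 2)

-- ===== PRECONDITION & SPEC =====
def Spec_median_budget_py (bands : List String) (out : Int) : Prop := out = median_budget_py_alt bands
instance (bands : List String) (out : Int) : Decidable (Spec_median_budget_py bands out) := by unfold Spec_median_budget_py; infer_instance

-- ===== CLAIM (what is proved, stated in full; the proofs are below) =====
def Claim_equal_median_budget_py : Prop := ∀ (bands : List String), Dom_median_budget_py bands → Spec_median_budget_py bands (median_budget_py bands)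

-- ===== LEMMAS AND PROOFS =====

-- parsed+clamped values of the input, the quantity both folds accumulate
def pvClamp (x : Int) : Int := if x < 1 then 1 else if x > 5 then 5 else x

def pvVals : List String → List Int
  | [] => []
  | b :: bs =>
    match PySem.Int.ofStr? b with
    | none => pvVals bs
    | some x => pvClamp x :: pvVals bs

def pvCounts (w : List Int) : List Int :=
  [(w.count 1 : Int), (w.count 2 : Int), (w.count 3 : Int), (w.count 4 : Int), (w.count 5 : Int)]

lemma pvVals_bounds (bands : List String) : ∀ x ∈ pvVals bands, 1 ≤ x ∧ x ≤ 5 := by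
  induction bands with
  | nil => simp [pvVals]
  | cons b bs ih =>
    intro x hx
    simp only [pvVals] at hx
    cases h : PySem.Int.ofStr? b with
    | none => rw [h] at hx; exact ih x hx
    | some y =>
      rw [h] at hx
      rcases List.mem_cons.mp hx with h1 | h1
      · subst h1; unfold pvClamp; split_ifs <;> omega
      · exact ih x h1

lemma foldA_eq (bands : List String) (acc : List Int) :
    bands.foldl (fun (vals : List Int) b =>
      match PySem.Int.ofStr? b with
      | none => vals
      | some x => vals ++ [if x < 1 then 1 else if x > 5 then 5 else x]) acc
    = acc ++ pvVals bands := by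
  induction bands generalizing acc with
  | nil => simp [pvVals]
  | cons b bs ih =>
    simp only [List.foldl_cons, pvVals]
    cases h : PySem.Int.ofStr? b with
    | none => simp [ih]
    | some x => simp [ih, pvClamp]

lemma pvCounts_append (w : List Int) (x : Int) (h1 : 1 ≤ x) (h5 : x ≤ 5) :
    pvCounts (w ++ [x])
      = PySem.List.pySetD (pvCounts w) (x - 1) (PySem.List.pyGetD (pvCounts w) (x - 1) 0 + 1) := by
  interval_cases x <;>
    simp [pvCounts, List.count_append, PySem.List.pySetD, PySem.List.pyGet?,
      PySem.List.pySet?, PySem.List.pyIdx?, PySem.List.pyGetD]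

lemma foldB_eq (bands : List String) (w : List Int) :
    bands.foldl (fun (st : List Int × Int) b =>
      match PySem.Int.ofStr? b with
      | none => st
      | some x =>
        let x := if x < 1 then 1 else if x > 5 then 5 else x
        (PySem.List.pySetD st.1 (x - 1) (PySem.List.pyGetD st.1 (x - 1) 0 + 1), st.2 + 1))
      (pvCounts w, (w.length : Int))
    = (pvCounts (w ++ pvVals bands), ((w ++ pvVals bands).length : Int)) := by
  induction bands generalizing w with
  | nil => simp [pvVals]
  | cons b bs ih =>
    simp only [List.foldl_cons, pvVals]
    cases h : PySem.Int.ofStr? b with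
    | none => simpa using ih w
    | some x =>
      simp only []
      set y := if x < 1 then 1 else if x > 5 then 5 else x with hy
      have hb : 1 ≤ y ∧ y ≤ 5 := by rw [hy]; split_ifs <;> omega
      rw [← pvCounts_append w y hb.1 hb.2,
        show ((w.length : Int) + 1) = (((w ++ [y]).length : Int)) by simp,
        ih (w ++ [y])]
      have hcl : pvClamp x = y := by rw [hy]; rfl
      simp [hcl, List.append_assoc]

-- the sorted list is the concatenation of the five constant blocks
lemma sorted_eq_blocks (w : List Int) (hw : ∀ x ∈ w, 1 ≤ x ∧ x ≤ 5) :
    PySem.List.sorted w (fun x => x) false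
      = List.replicate (w.count 1) 1 ++ List.replicate (w.count 2) 2 ++
        List.replicate (w.count 3) 3 ++ List.replicate (w.count 4) 4 ++
        List.replicate (w.count 5) 5 := by
  apply PySem.List.sorted_id_eq_of_perm_of_pairwise
  · rw [List.perm_iff_count]
    intro a
    by_cases h1 : a = 1; · subst h1; simp [List.count_append, List.count_replicate]
    by_cases h2 : a = 2; · subst h2; simp [List.count_append, List.count_replicate]
    by_cases h3 : a = 3; · subst h3; simp [List.count_append, List.count_replicate]
    by_cases h4 : a = 4; · subst h4; simp [List.count_append, List.count_replicate]
    by_cases h5 : a = 5; · subst h5; simp [List.count_append, List.count_replicate]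
    have hnm : a ∉ w := by intro hm; have := hw a hm; omega
    simp only [List.count_append, List.count_replicate, List.count_eq_zero.mpr hnm]
    split_ifs <;> simp_all
  · simp only [List.pairwise_append]
    refine ⟨⟨⟨⟨?_, ?_, ?_⟩, ?_, ?_⟩, ?_, ?_⟩, ?_, ?_⟩ <;>
      simp [List.pairwise_replicate, List.mem_replicate, List.mem_append] <;>
      intros <;> omega

lemma getD_replicate_append (c : Nat) (x : Int) (rest : List Int) (k : Nat) :
    (List.replicate c x ++ rest).getD k 0 = if k < c then x else rest.getD (k - c) 0 := by
  by_cases h : k < c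
  · rw [if_pos h, List.getD_eq_getElem?_getD, List.getElem?_append_left (by simpa)]
    simp [h]
  · rw [if_neg h, List.getD_eq_getElem?_getD,
      List.getElem?_append_right (by simpa using Nat.le_of_not_lt h)]
    simp [List.getD_eq_getElem?_getD]

lemma counts_sum (w : List Int) (hw : ∀ x ∈ w, 1 ≤ x ∧ x ≤ 5) :
    w.count 1 + w.count 2 + w.count 3 + w.count 4 + w.count 5 = w.length := by
  induction w with
  | nil => simp
  | cons x xs ih =>
    have hx := hw x (by simp)
    have ih' := ih (fun y hy => hw y (List.mem_cons_of_mem _ hy))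
    simp only [List.count_cons, List.length_cons]
    have hcase : x = 1 ∨ x = 2 ∨ x = 3 ∨ x = 4 ∨ x = 5 := by omega
    rcases hcase with h | h | h | h | h <;> subst h <;> simp <;> omega

lemma selLoop_eval (c1 c2 c3 c4 c5 k : Int) :
    selLoop [c1, c2, c3, c4, c5] [1, 2, 3, 4] k =
      if k < c1 then 1 else if k - c1 < c2 then 2 else if k - c1 - c2 < c3 then 3
        else if k - c1 - c2 - c3 < c4 then 4 else 5 := by
  norm_num [selLoop, PySem.List.pyGetD, PySem.List.pyGet?, PySem.List.pyIdx?,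
    show ((2 : Int).toNat = 2) from rfl, show ((3 : Int).toNat = 3) from rfl]

lemma core (w : List Int) (hw : ∀ x ∈ w, 1 ≤ x ∧ x ≤ 5) (k : Nat) (hk : k < w.length) :
    (PySem.List.sorted w (fun x => x) false).getD k 0
      = selLoop (pvCounts w) (PySem.List.pyRange 1 5 1) (k : Int) := by
  have hrange : PySem.List.pyRange 1 5 1 = [1, 2, 3, 4] := by decide
  have hsum := counts_sum w hw
  rw [sorted_eq_blocks w hw, hrange]
  unfold pvCounts
  rw [selLoop_eval]
  simp only [List.append_assoc]
  rw [getD_replicate_append, getD_replicate_append, getD_replicate_append,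
    getD_replicate_append]
  split_ifs <;>
    first
      | omega
      | (have hlt : k - w.count 1 - w.count 2 - w.count 3 - w.count 4 < w.count 5 := by omega
         rw [List.getD_eq_getElem?_getD]
         simp [hlt])

-- ===== VERDICT (by name: the statement is the Claim_ definition above) =====
theorem median_budget_py_spec : Claim_equal_median_budget_py := by
  intro bands _
  unfold Spec_median_budget_py median_budget_py median_budget_py_alt
  have hA := foldA_eq bands []
  have hB := foldB_eq bands []
  simp only [List.nil_append, List.length_nil, Nat.cast_zero] at hA hB
  have h0 : pvCounts [] = [0, 0, 0, 0, 0] := by simp [pvCounts]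
  rw [h0] at hB
  simp only [hA, hB]
  by_cases hv : pvVals bands = []
  · simp [hv]
  · have hn : 0 < (pvVals bands).length := List.length_pos_of_ne_nil hv
    rw [if_neg hv, if_neg (show ¬ (((pvVals bands).length : Int) = 0) by exact_mod_cast Nat.pos_iff_ne_zero.mp hn)]
    rw [PySem.List.len_eq,
      show PySem.Int.floordiv (((pvVals bands).length : Nat) : Int) 2
          = ((((pvVals bands).length / 2 : Nat)) : Int) from by
        exact_mod_cast PySem.Int.floordiv_natCast _ 2,
      PySem.List.pyGetD_natCast]
    exact core _ (pvVals_bounds bands) _ (Nat.div_lt_self hn (by norm_num))
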